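-- pv_equiv track=rewrite | github.com/Spmart/chain-analyzer | analyzer.py | is_regular_right
-- ===== SOURCE A (Python) =====
-- def contains_all(str, set):
--     """Проверить, что 'str' содержит все символы из 'set'"""
--     return 0 not in [c in str for c in set]
--
-- def is_regular_right(VT, VN, P):
--     """Проверяет, относится ли грамматика к третьему типу (РП)"""
--     left_sides = list(P.keys())
--     right_sides = list(P.values())
--     VT_str = ''.join(VT)
--     VN_str = ''.join(VN)
--     for left_side in left_sides:
--         if not contains_all(VN_str, left_side):
--             return False
--     for right_side in right_sides:
--         for item in right_side:
--             if len(item) == 1:  # если длина строки = 1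
--                 if not contains_all(VT_str, item):
--                     return False
--             elif len(item) == 2:  # если длина строки = 2
--                 if not contains_all(VT_str, item[0]):  # самый левый символ должен быть в VT
--                     return False
--                 if not contains_all(VN_str, item[1]):  # самый правый символ должен быть в VN
--                     return False
--             else:  # если в строке больше двух позиций
--                 return False
--     for left_side in left_sides:  # проверить, что терминалы в правилах для нетерминала идентичны
--         right_side = list(P.get(left_side))  # получить правую часть для каждого нетерминала
--         terminal = ''
--         for item in right_side:
--             if len(item) == 1:
--                 if terminal == '':  # если это первая итерация, то записать терминал
--                     terminal = item
--                 if terminal != item: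
--                     return False
--             else:
--                 if terminal == '':
--                     terminal = item[0]
--                 if terminal != item[0]:
--                     return False
--     return True
-- ===== SOURCE B (Python) =====
-- def is_regular_right(VT, VN, P):
--     """Single pass over P.items() with set-based membership and an on-the-fly
--     expected-terminal per nonterminal."""
--     VT_chars = set(''.join(VT))
--     VN_chars = set(''.join(VN))
--     for lhs, rules in P.items():
--         if any(ch not in VN_chars for ch in lhs):
--             return False
--         expected = None
--         for item in rules:
--             if len(item) == 1:
--                 if item not in VT_chars:
--                     return False
--                 t = item
--             elif len(item) == 2:
--                 if item[0] not in VT_chars or item[1] not in VN_chars: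
--                     return False
--                 t = item[0]
--             else:
--                 return False
--             if expected is None:
--                 expected = t
--             elif expected != t:
--                 return False
--     return True
-- ===== Notes on version B (the rewrite author's own statement) =====
-- stated objective: alternative
-- what changed: A joins VT/VN into strings and makes three separate grouped passes (all left sides, then all right-side shapes, then a terminal-consistency pass that re-looks every key up in P); B makes one pass over P.items(), checks the lhs characters, and fuses shape, membership (via precomputed character sets) and an on-the-fly expected-terminal check per nonterminal.
import Mathlib
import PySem

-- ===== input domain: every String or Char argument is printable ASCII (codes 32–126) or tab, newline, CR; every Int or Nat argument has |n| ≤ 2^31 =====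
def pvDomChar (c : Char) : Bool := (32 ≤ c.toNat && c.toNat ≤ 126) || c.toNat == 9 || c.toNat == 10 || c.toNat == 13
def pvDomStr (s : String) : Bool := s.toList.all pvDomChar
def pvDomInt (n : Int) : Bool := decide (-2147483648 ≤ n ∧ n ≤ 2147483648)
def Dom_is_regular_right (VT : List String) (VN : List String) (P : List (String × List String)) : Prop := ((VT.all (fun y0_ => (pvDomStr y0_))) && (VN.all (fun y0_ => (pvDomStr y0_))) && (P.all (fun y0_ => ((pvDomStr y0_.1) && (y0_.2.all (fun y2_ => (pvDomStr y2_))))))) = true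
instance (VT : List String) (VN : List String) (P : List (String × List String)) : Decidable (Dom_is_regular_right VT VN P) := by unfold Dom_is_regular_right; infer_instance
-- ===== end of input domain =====

-- B replaces A's three separate grouped scans (lhs loop, rule-shape loop, terminal-consistency
-- loop with dict re-lookups) by one pass over the items with set-based membership; objective: alternative.

-- ===== PORT A =====
-- contains_all(str, set):  0 not in [c in str for c in set]
def containsAllA (s : List Char) (t : List Char) : Bool :=
  !((t.map (fun c => s.contains c)).contains false)

-- first loop: every left side made of characters of VN_str
def aLoop1 (VNstr : List Char) : List String → Bool
  | [] => true
  | l :: rest => if !containsAllA VNstr l.toList then false else aLoop1 VNstr rest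

-- inner loop of the second pass over one right side
def aLoop2Items (VTstr VNstr : List Char) : List String → Bool
  | [] => true
  | item :: rest =>
    let cs := item.toList
    if cs.length == 1 then
      if !containsAllA VTstr cs then false else aLoop2Items VTstr VNstr rest
    else if cs.length == 2 then
      match cs with
      | c0 :: c1 :: _ =>
        if !containsAllA VTstr [c0] then false
        else if !containsAllA VNstr [c1] then false
        else aLoop2Items VTstr VNstr rest
      | _ => false  -- unreachable: cs.length = 2
    else false

def aLoop2 (VTstr VNstr : List Char) : List (List String) → Bool
  | [] => true
  | rs :: rest => if aLoop2Items VTstr VNstr rs then aLoop2 VTstr VNstr rest else false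

-- third pass: terminals of the rules of one nonterminal are identical ('' sentinel as in A)
def aLoop3Items (terminal : List Char) : List String → Bool
  | [] => true
  | item :: rest =>
    let cs := item.toList
    if cs.length == 1 then
      let terminal' := if terminal == ([] : List Char) then cs else terminal
      if terminal' != cs then false else aLoop3Items terminal' rest
    else
      match cs with
      | c0 :: _ =>
        let terminal' := if terminal == ([] : List Char) then [c0] else terminal
        if terminal' != [c0] then false else aLoop3Items terminal' rest
      | [] => false  -- in Python item[0] would raise IndexError; unreachable: loop 2 already returned False

def aLoop3 (d : PySem.Dict String (List String)) : List String → Bool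
  | [] => true
  | k :: rest =>
    match d.get? k with
    | some rs => if aLoop3Items [] rs then aLoop3 d rest else false
    | none => false  -- unreachable: k is one of d's keys

def is_regular_right (VT : List String) (VN : List String) (P : List (String × List String)) : Bool :=
  let d := PySem.Dict.ofList P
  let leftSides := d.keys
  let rightSides := d.values
  let VTstr := VT.flatMap String.toList   -- characters of ''.join(VT)
  let VNstr := VN.flatMap String.toList   -- characters of ''.join(VN)
  if aLoop1 VNstr leftSides then
    if aLoop2 VTstr VNstr rightSides then aLoop3 d leftSides else false
  else false

-- ===== PORT B =====
-- inner loop over the rules of one nonterminal; `expected` is the pending terminal (None at start)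
def bInner (VTset VNset : PySem.Set Char) (expected : Option Char) : List String → Bool
  | [] => true
  | item :: rest =>
    match item.toList with
    | [c] =>
      if !(PySem.Set.contains VTset c) then false
      else
        match expected with
        | none => bInner VTset VNset (some c) rest
        | some e => if e != c then false else bInner VTset VNset (some e) rest
    | [c0, c1] =>
      if !(PySem.Set.contains VTset c0) || !(PySem.Set.contains VNset c1) then false
      else
        match expected with
        | none => bInner VTset VNset (some c0) rest
        | some e => if e != c0 then false else bInner VTset VNset (some e) rest
    | _ => false

def bPairs (VTset VNset : PySem.Set Char) : List (String × List String) → Bool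
  | [] => true
  | (lhs, rules) :: rest =>
    if lhs.toList.any (fun ch => !(PySem.Set.contains VNset ch)) then false
    else if bInner VTset VNset none rules then bPairs VTset VNset rest else false

def is_regular_right_alt (VT : List String) (VN : List String) (P : List (String × List String)) : Bool :=
  let VTset := PySem.Set.ofList (VT.flatMap String.toList)   -- set(''.join(VT))
  let VNset := PySem.Set.ofList (VN.flatMap String.toList)   -- set(''.join(VN))
  bPairs VTset VNset (PySem.Dict.ofList P).items

-- ===== PRECONDITION & SPEC =====
def Spec_is_regular_right (VT : List String) (VN : List String) (P : List (String × List String)) (out : Bool) : Prop := out = is_regular_right_alt VT VN P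
instance (VT : List String) (VN : List String) (P : List (String × List String)) (out : Bool) : Decidable (Spec_is_regular_right VT VN P out) := by unfold Spec_is_regular_right; infer_instance

-- ===== CLAIM (what is proved, stated in full; the proofs are below) =====
def Claim_equal_is_regular_right : Prop := ∀ (VT : List String) (VN : List String) (P : List (String × List String)), Dom_is_regular_right VT VN P → Spec_is_regular_right VT VN P (is_regular_right VT VN P)

-- ===== LEMMAS AND PROOFS =====

theorem aLoop1_eq_all (VNstr : List Char) (ks : List String) :
    aLoop1 VNstr ks = ks.all (fun l => containsAllA VNstr l.toList) := by
  induction ks with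
  | nil => rfl
  | cons k rest ih =>
    simp only [aLoop1, List.all_cons, ih]
    cases containsAllA VNstr k.toList <;> simp

theorem aLoop2_eq_all (VTstr VNstr : List Char) (rss : List (List String)) :
    aLoop2 VTstr VNstr rss = rss.all (fun rs => aLoop2Items VTstr VNstr rs) := by
  induction rss with
  | nil => rfl
  | cons rs rest ih =>
    simp only [aLoop2, List.all_cons, ih]
    cases aLoop2Items VTstr VNstr rs <;> simp

theorem aLoop3_eq_all (d : PySem.Dict String (List String)) (L : List (String × List String))
    (h : ∀ p ∈ L, d.get? p.1 = some p.2) :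
    aLoop3 d (L.map Prod.fst) = L.all (fun p => aLoop3Items [] p.2) := by
  induction L with
  | nil => rfl
  | cons p rest ih =>
    have hp := h p (by simp)
    simp only [List.map_cons, aLoop3, hp, List.all_cons,
      ih (fun q hq => h q (by simp [hq]))]
    cases aLoop3Items [] p.2 <;> simp

theorem bPairs_eq_all (VTset VNset : PySem.Set Char) (L : List (String × List String)) :
    bPairs VTset VNset L = L.all (fun p =>
      !(p.1.toList.any (fun ch => !(PySem.Set.contains VNset ch))) && bInner VTset VNset none p.2) := by
  induction L with
  | nil => rfl
  | cons p rest ih =>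
    obtain ⟨lhs, rules⟩ := p
    simp only [bPairs, List.all_cons, ih]
    cases lhs.toList.any (fun ch => !(PySem.Set.contains VNset ch)) <;>
      cases bInner VTset VNset none rules <;> simp

-- membership through Set.ofList is membership in the underlying character list
theorem set_contains_ofList (s : List Char) (c : Char) :
    PySem.Set.contains (PySem.Set.ofList s) c = s.contains c := by
  simp only [PySem.Set.contains, List.contains_eq_mem, PySem.Set.mem_ofList]

theorem containsAllA_singleton (s : List Char) (c : Char) :
    containsAllA s [c] = s.contains c := by
  simp [containsAllA]

theorem containsAllA_eq_not_any (s : List Char) (t : List Char) :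
    containsAllA s t = !(t.any (fun ch => !(PySem.Set.contains (PySem.Set.ofList s) ch))) := by
  induction t with
  | nil => rfl
  | cons c rest ih =>
    simp only [containsAllA, List.map_cons, List.any_cons] at *
    rw [set_contains_ofList]
    cases hc : s.contains c <;> simp_all [containsAllA]

-- state correspondence between A's '' sentinel and B's Option
def StateRel (term : List Char) (e : Option Char) : Prop :=
  (term = [] ∧ e = none) ∨ ∃ c, term = [c] ∧ e = some c

-- the heart: A's shape pass && A's terminal pass over the same rules = B's fused inner loop
theorem rules_eq (VTstr VNstr : List Char) (rules : List String) :
    ∀ (term : List Char) (e : Option Char), StateRel term e →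
      (aLoop2Items VTstr VNstr rules && aLoop3Items term rules)
        = bInner (PySem.Set.ofList VTstr) (PySem.Set.ofList VNstr) e rules := by
  induction rules with
  | nil => intro term e _; rfl
  | cons item rest ih =>
    intro term e hrel
    rcases hcs : item.toList with _ | ⟨c0, _ | ⟨c1, tail⟩⟩
    · -- empty item: A's shape pass rejects, B rejects
      simp [aLoop2Items, bInner, hcs]
    · -- one-character item
      simp only [aLoop2Items, aLoop3Items, bInner, hcs]
      rw [containsAllA_singleton, ← set_contains_ofList]
      cases hm : PySem.Set.contains (PySem.Set.ofList VTstr) c0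
      · simp
      · rcases hrel with ⟨ht, he⟩ | ⟨c, ht, he⟩
        · subst ht he
          simp
          exact ih [c0] (some c0) (Or.inr ⟨c0, rfl, rfl⟩)
        · subst ht he
          by_cases hec : c = c0
          · subst hec
            simp
            exact ih [c] (some c) (Or.inr ⟨c, rfl, rfl⟩)
          · have h1 : ([c] == ([] : List Char)) = false := by simp
            simp [h1, bne, hec]
    · rcases tail with _ | ⟨c2, tail2⟩
      · -- two-character item
        simp only [aLoop2Items, aLoop3Items, bInner, hcs]
        rw [containsAllA_singleton, containsAllA_singleton,
          ← set_contains_ofList VTstr, ← set_contains_ofList VNstr]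
        cases hm0 : PySem.Set.contains (PySem.Set.ofList VTstr) c0
        · simp
        · cases hm1 : PySem.Set.contains (PySem.Set.ofList VNstr) c1
          · simp
          · rcases hrel with ⟨ht, he⟩ | ⟨c, ht, he⟩
            · subst ht he
              simp
              exact ih [c0] (some c0) (Or.inr ⟨c0, rfl, rfl⟩)
            · subst ht he
              by_cases hec : c = c0
              · subst hec
                simp
                exact ih [c] (some c) (Or.inr ⟨c, rfl, rfl⟩)
              · have h1 : ([c] == ([] : List Char)) = false := by simp
                simp [h1, bne, hec]
      · -- length ≥ 3: both reject
        simp [aLoop2Items, bInner, hcs]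

theorem all_and_distrib {α : Type} (l : List α) (p q : α → Bool) :
    (l.all p && l.all q) = l.all (fun x => p x && q x) := by
  induction l with
  | nil => rfl
  | cons x rest ih =>
    simp only [List.all_cons, ← ih]
    cases p x <;> cases q x <;> cases rest.all p <;> cases rest.all q <;> rfl

theorem pair_eq (VTstr VNstr : List Char) (lhs : String) (rules : List String) :
    (containsAllA VNstr lhs.toList && (aLoop2Items VTstr VNstr rules && aLoop3Items [] rules))
      = (!(lhs.toList.any (fun ch => !(PySem.Set.contains (PySem.Set.ofList VNstr) ch)))
          && bInner (PySem.Set.ofList VTstr) (PySem.Set.ofList VNstr) none rules) := by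
  rw [containsAllA_eq_not_any, rules_eq VTstr VNstr rules [] none (Or.inl ⟨rfl, rfl⟩)]

-- ===== VERDICT (by name: the statement is the Claim_ definition above) =====
theorem is_regular_right_spec : Claim_equal_is_regular_right := by
  intro VT VN P _
  show is_regular_right VT VN P = is_regular_right_alt VT VN P
  simp only [is_regular_right, is_regular_right_alt]
  set d := PySem.Dict.ofList P with hd
  set VTstr := VT.flatMap String.toList
  set VNstr := VN.flatMap String.toList
  have hnd : d.keys.Nodup := PySem.Dict.nodup_keys_ofList P
  have hkeys : d.keys = d.items.map Prod.fst := rfl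
  have hvals : d.values = d.items.map Prod.snd := rfl
  rw [hkeys, hvals, bPairs_eq_all,
    aLoop3_eq_all d d.items (fun p hp => PySem.Dict.get?_of_mem_items d hp hnd),
    aLoop1_eq_all, aLoop2_eq_all, List.all_map, List.all_map]
  have : ∀ (a b c : Bool), (if a then if b then c else false else false) = (a && (b && c)) := by
    decide
  rw [this, all_and_distrib, all_and_distrib]
  congr 1
  funext p
  simp only [Function.comp]
  exact pair_eq VTstr VNstr p.1 p.2
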